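-- pv_equiv track=rewrite | github.com/kjmillerCURIS/audio_eval | json_as_a_judge/AudioJudge/experiments/significance_test/chatbotarena_positional_bias.py | categorize_predictions
-- ===== SOURCE A (Python) =====
-- def categorize_predictions(preds_ab, preds_ba):
--     """
--     Categorize prediction pairs into:
--     - stable: consistent predictions (A->B or B->A)
--     - position1: bias toward position 1 (A->A)
--     - position2: bias toward position 2 (B->B)
--     - ties: both predict tie (C->C)
--     """
--     n = min(len(preds_ab), len(preds_ba))
--     preds_ab = preds_ab[:n]
--     preds_ba = preds_ba[:n]
--
--     categories = {
--         "stable": [],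
--         "position1": [],  # A->A bias
--         "position2": [],  # B->B bias
--         "ties": [],
--     }
--
--     for i in range(n):
--         pred_ab = preds_ab[i]
--         pred_ba = preds_ba[i]
--
--         if (pred_ab == "A" and pred_ba == "B") or (pred_ab == "B" and pred_ba == "A"):
--             categories["stable"].append(i)
--         elif pred_ab == "A" and pred_ba == "A":
--             categories["position1"].append(i)
--         elif pred_ab == "B" and pred_ba == "B":
--             categories["position2"].append(i)
--         elif pred_ab == "C" and pred_ba == "C":
--             categories["ties"].append(i)
--
--     return categories
-- ===== SOURCE B (Python) =====
-- def _merge(xs, ys):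
--     # merge two ascending index lists into one ascending list
--     out = []
--     i = j = 0
--     while i < len(xs) and j < len(ys):
--         if xs[i] <= ys[j]:
--             out.append(xs[i]); i += 1
--         else:
--             out.append(ys[j]); j += 1
--     out.extend(xs[i:])
--     out.extend(ys[j:])
--     return out
--
-- def categorize_predictions(preds_ab, preds_ba):
--     # group indices by the (pred_ab, pred_ba) pair, then assemble the four
--     # categories by dictionary lookup; "stable" merges its two sorted groups
--     groups = {}
--     for i, pair in enumerate(zip(preds_ab, preds_ba)):
--         groups.setdefault(pair, []).append(i)
--     def g(a, b):
--         return groups.get((a, b), [])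
--     return {
--         "stable": _merge(g("A", "B"), g("B", "A")),
--         "position1": g("A", "A"),
--         "position2": g("B", "B"),
--         "ties": g("C", "C"),
--     }
-- ===== Notes on version B (the rewrite author's own statement) =====
-- stated objective: alternative
-- what changed: Instead of one pass dispatching each index through an if/elif chain into four preallocated lists, B groups indices by their (pred_ab, pred_ba) pair into a dictionary keyed by the pair, then assembles the result by lookups, obtaining 'stable' as a two-pointer merge of the two sorted groups ('A','B') and ('B','A').
import Mathlib
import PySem

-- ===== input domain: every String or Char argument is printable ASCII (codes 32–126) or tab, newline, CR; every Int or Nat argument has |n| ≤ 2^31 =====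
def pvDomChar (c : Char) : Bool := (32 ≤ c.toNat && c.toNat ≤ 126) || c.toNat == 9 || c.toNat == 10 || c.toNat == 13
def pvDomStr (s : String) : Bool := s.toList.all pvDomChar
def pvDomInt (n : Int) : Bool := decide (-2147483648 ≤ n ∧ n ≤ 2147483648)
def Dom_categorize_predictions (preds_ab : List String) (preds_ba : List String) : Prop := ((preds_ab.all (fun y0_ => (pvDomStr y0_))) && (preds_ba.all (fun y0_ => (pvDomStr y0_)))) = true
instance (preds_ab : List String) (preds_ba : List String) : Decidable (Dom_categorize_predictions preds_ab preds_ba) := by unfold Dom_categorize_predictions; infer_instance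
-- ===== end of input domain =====

-- B replaces A's single classifying pass (if/elif chain appending into four preallocated lists)
-- by grouping indices under their (pred_ab, pred_ba) pair in a dictionary keyed by the pair,
-- then assembling the result by lookups, with "stable" a two-pointer merge of its two sorted groups.

-- ===== PORT A =====
-- Loop body of A (the if/elif chain appending i to one of the dict's lists).
-- preds_ab[i]/preds_ba[i] are ported as pyGetD with default "": i ∈ range(n) is always in range, so this is exact.
def pvStepA (ab : List String) (ba : List String) (d : PySem.Dict String (List Int)) (i : Int) : PySem.Dict String (List Int) :=
  let pred_ab := PySem.List.pyGetD ab i ""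
  let pred_ba := PySem.List.pyGetD ba i ""
  if (pred_ab == "A" && pred_ba == "B") || (pred_ab == "B" && pred_ba == "A") then
    d.modify "stable" [] (fun l => l ++ [i])
  else if pred_ab == "A" && pred_ba == "A" then
    d.modify "position1" [] (fun l => l ++ [i])
  else if pred_ab == "B" && pred_ba == "B" then
    d.modify "position2" [] (fun l => l ++ [i])
  else if pred_ab == "C" && pred_ba == "C" then
    d.modify "ties" [] (fun l => l ++ [i])
  else d

def categorize_predictions (preds_ab : List String) (preds_ba : List String) : List (String × List Int) :=
  let n : Nat := min preds_ab.length preds_ba.length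
  let ab := PySem.List.slice preds_ab none (some (n : Int))
  let ba := PySem.List.slice preds_ba none (some (n : Int))
  let categories : PySem.Dict String (List Int) :=
    PySem.Dict.ofList [("stable", []), ("position1", []), ("position2", []), ("ties", [])]
  ((PySem.List.pyRange 0 (n : Int) 1).foldl (pvStepA ab ba) categories).items

-- ===== PORT B =====
-- B's _merge: two-pointer merge of two ascending lists (transliterated as structural recursion).
def pvMerge : List Int → List Int → List Int
  | [], ys => ys
  | x :: xs, [] => x :: xs
  | x :: xs, y :: ys => if x ≤ y then x :: pvMerge xs (y :: ys) else y :: pvMerge (x :: xs) ys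


def categorize_predictions_alt (preds_ab : List String) (preds_ba : List String) : List (String × List Int) :=
  let groups : PySem.Dict (String × String) (List Int) :=
    (PySem.List.enumerate (preds_ab.zip preds_ba) 0).foldl
      (fun d p => d.modify p.2 [] (fun l => l ++ [p.1])) PySem.Dict.empty
  let g : String → String → List Int := fun a b => groups.getD (a, b) []
  [("stable", pvMerge (g "A" "B") (g "B" "A")),
   ("position1", g "A" "A"),
   ("position2", g "B" "B"),
   ("ties", g "C" "C")]

-- ===== PRECONDITION & SPEC =====
def Spec_categorize_predictions (preds_ab : List String) (preds_ba : List String) (out : List (String × List Int)) : Prop := out = categorize_predictions_alt preds_ab preds_ba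
instance (preds_ab : List String) (preds_ba : List String) (out : List (String × List Int)) : Decidable (Spec_categorize_predictions preds_ab preds_ba out) := by unfold Spec_categorize_predictions; infer_instance

-- ===== CLAIM (what is proved, stated in full; the proofs are below) =====
def Claim_equal_categorize_predictions : Prop := ∀ (preds_ab : List String) (preds_ba : List String), Dom_categorize_predictions preds_ab preds_ba → Spec_categorize_predictions preds_ab preds_ba (categorize_predictions preds_ab preds_ba)

-- ===== LEMMAS AND PROOFS =====

-- Equation lemmas for pvMerge.
lemma pvMerge_nil (ys : List Int) : pvMerge [] ys = ys := by simp [pvMerge]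
lemma pvMerge_nil_right (x : Int) (xs : List Int) : pvMerge (x :: xs) [] = x :: xs := by simp [pvMerge]
lemma pvMerge_cons_cons (x y : Int) (xs ys : List Int) :
    pvMerge (x :: xs) (y :: ys) = if x ≤ y then x :: pvMerge xs (y :: ys) else y :: pvMerge (x :: xs) ys := by rw [pvMerge]

-- Loop invariant for A's fold: starting from the literal four-key dict, the fold appends
-- to each key exactly the indices of L satisfying that key's predicate, in order.
lemma pvFoldA_items (ab : List String) (ba : List String) :
    ∀ (L : List Int) (s p q t : List Int),
    ((L.foldl (pvStepA ab ba)
        (PySem.Dict.mk [("stable", s), ("position1", p), ("position2", q), ("ties", t)])).items)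
    = [("stable", s ++ L.filter (fun i =>
          (PySem.List.pyGetD ab i "" == "A" && PySem.List.pyGetD ba i "" == "B")
          || (PySem.List.pyGetD ab i "" == "B" && PySem.List.pyGetD ba i "" == "A"))),
       ("position1", p ++ L.filter (fun i =>
          PySem.List.pyGetD ab i "" == "A" && PySem.List.pyGetD ba i "" == "A")),
       ("position2", q ++ L.filter (fun i =>
          PySem.List.pyGetD ab i "" == "B" && PySem.List.pyGetD ba i "" == "B")),
       ("ties", t ++ L.filter (fun i =>
          PySem.List.pyGetD ab i "" == "C" && PySem.List.pyGetD ba i "" == "C"))] := by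
  intro L
  induction L with
  | nil => intro s p q t; simp
  | cons i L ih =>
    intro s p q t
    simp only [List.foldl_cons, List.filter_cons, pvStepA]
    split_ifs with h1 h2 h3 h4 <;>
      simp_all [PySem.Dict.modify, PySem.Dict.contains, PySem.Dict.get?, PySem.Dict.getD, PySem.Dict.insert]

-- Merging the p-filter with the q-filter of a strictly increasing list, when p and q never
-- both hold, is the (p || q)-filter.
lemma pvMerge_filter (p q : Int → Bool) (hpq : ∀ x, ¬(p x = true ∧ q x = true)) :
    ∀ (L : List Int), L.Pairwise (· < ·) →
      pvMerge (L.filter p) (L.filter q) = L.filter (fun x => p x || q x) := by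
  intro L
  induction L with
  | nil => intro _; simp [pvMerge_nil]
  | cons a L ih =>
    intro h
    rw [List.pairwise_cons] at h
    obtain ⟨ha, hL⟩ := h
    by_cases hp : p a = true
    · have hq : q a = false := by
        cases hq' : q a with
        | true => exact absurd ⟨hp, hq'⟩ (hpq a)
        | false => rfl
      simp only [List.filter_cons, hp, hq, Bool.true_or, if_true, Bool.false_eq_true, if_false]
      cases hqL : L.filter q with
      | nil =>
        have hqf : ∀ x ∈ L, q x = false := by
          intro x hx
          have := List.filter_eq_nil_iff.mp hqL x hx
          simpa using this
        have hcong : L.filter (fun x => p x || q x) = L.filter p :=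
          (List.filter_congr (fun x hx => by simp [hqf x hx])).symm
        rw [pvMerge_nil_right, hcong]
      | cons y ys =>
        have hy : y ∈ L.filter q := by rw [hqL]; exact List.mem_cons_self
        have hyL : y ∈ L := List.mem_of_mem_filter hy
        have hay : a ≤ y := le_of_lt (ha y hyL)
        rw [pvMerge_cons_cons, if_pos hay, ← hqL, ih hL]
    · by_cases hq : q a = true
      · have hp' : p a = false := by simpa using hp
        simp only [List.filter_cons, hp', hq, Bool.false_or, if_true, Bool.false_eq_true, if_false]
        cases hpL : L.filter p with
        | nil =>
          rw [pvMerge_nil]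
          have hpf : ∀ x ∈ L, p x = false := by
            intro x hx
            have := List.filter_eq_nil_iff.mp hpL x hx
            simpa using this
          have hcong : L.filter (fun x => p x || q x) = L.filter q :=
            (List.filter_congr (fun x hx => by simp [hpf x hx])).symm
          rw [hcong]
        | cons x xs =>
          have hx : x ∈ L.filter p := by rw [hpL]; exact List.mem_cons_self
          have hxL : x ∈ L := List.mem_of_mem_filter hx
          have hax : ¬ (x ≤ a) := not_le.mpr (ha x hxL)
          rw [pvMerge_cons_cons, if_neg hax, ← hpL, ih hL]
      · have hp' : p a = false := by simpa using hp
        have hq' : q a = false := by simpa using hq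
        simp only [List.filter_cons, hp', hq', Bool.false_or, Bool.false_eq_true, if_false]
        exact ih hL

-- B's grouping fold, characterised per key: the indices whose pair equals the key, ascending.
lemma pvGroups_getD (as bs : List String) (c : String × String) :
    ((PySem.List.enumerate (as.zip bs) 0).foldl
        (fun d p => d.modify p.2 [] (fun l => l ++ [p.1])) PySem.Dict.empty).getD c []
    = ((List.range (min as.length bs.length)).map (fun k : Nat => (k : Int))).filter
        (fun i => PySem.List.pyGetD as i "" == c.1 && PySem.List.pyGetD bs i "" == c.2) := by
  have hstep : (PySem.List.enumerate (as.zip bs) 0).foldl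
      (fun d p => d.modify p.2 [] (fun l => l ++ [p.1])) (PySem.Dict.empty : PySem.Dict (String × String) (List Int))
      = ((PySem.List.enumerate (as.zip bs) 0).map Prod.swap).foldl
          (fun d p => d.modify p.1 [] (fun l => l ++ [p.2])) PySem.Dict.empty := by
    rw [List.foldl_map]
    rfl
  rw [hstep, PySem.Dict.getD_foldl_modify_append, PySem.Dict.getD_empty, List.nil_append,
      List.filter_map, List.map_map]
  rw [PySem.List.enumerate_eq_map_pyRange (as.zip bs) ("", ""), List.filter_map, List.map_map]
  have hlen : PySem.List.len (as.zip bs) = ((min as.length bs.length : Nat) : Int) := by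
    simp [PySem.List.len, List.length_zip]
  rw [hlen, PySem.List.pyRange_zero_natCast, List.filter_map, List.map_map]
  rw [List.map_congr_left (fun k _ => rfl), List.filter_map]
  congr 1
  apply List.filter_congr
  intro k hk
  rw [List.mem_range] at hk
  have h1 : k < as.length := lt_of_lt_of_le hk (min_le_left _ _)
  have h2 : k < bs.length := lt_of_lt_of_le hk (min_le_right _ _)
  have hz : (as.zip bs).getD k ("","") = (as.getD k "", bs.getD k "") := by
    simp [List.getD_eq_getElem?_getD, h1, h2, hk]
  simp only [Function.comp_apply, Prod.swap_prod_mk, PySem.List.pyGetD_natCast, hz]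
  cases c with
  | mk c1 c2 => simp [BEq.beq]

-- Strict monotone cast keeps the index list strictly increasing.
lemma pvLc_pairwise (n : Nat) :
    ((List.range n).map (fun k : Nat => (k : Int))).Pairwise (· < ·) := by
  apply List.Pairwise.map _ _ (List.pairwise_lt_range (n := n))
  intro a b h
  exact_mod_cast h

-- Replacing the truncated lists by the full lists under a filter over range n.
lemma pvFilter_take (as bs : List String) (f : String → String → Bool) :
    ((List.range (min as.length bs.length)).map (fun k : Nat => (k : Int))).filter
        (fun i => f (PySem.List.pyGetD (as.take (min as.length bs.length)) i "")
                    (PySem.List.pyGetD (bs.take (min as.length bs.length)) i ""))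
    = ((List.range (min as.length bs.length)).map (fun k : Nat => (k : Int))).filter
        (fun i => f (PySem.List.pyGetD as i "") (PySem.List.pyGetD bs i "")) := by
  apply List.filter_congr
  intro i hi
  obtain ⟨k, hk, rfl⟩ := List.mem_map.mp hi
  rw [List.mem_range] at hk
  have h1 : k < as.length := lt_of_lt_of_le hk (min_le_left _ _)
  have h2 : k < bs.length := lt_of_lt_of_le hk (min_le_right _ _)
  simp only [PySem.List.pyGetD_natCast]
  simp [List.getD_eq_getElem?_getD, h1, h2, hk]

-- ===== VERDICT (by name: the statement is the Claim_ definition above) =====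
theorem categorize_predictions_spec : Claim_equal_categorize_predictions := by
  intro preds_ab preds_ba _
  unfold Spec_categorize_predictions categorize_predictions categorize_predictions_alt
  simp only [PySem.List.slice_to_natCast, PySem.List.pyRange_zero_natCast]
  rw [show (PySem.Dict.ofList [("stable", ([] : List Int)), ("position1", []), ("position2", []), ("ties", [])])
      = PySem.Dict.mk [("stable", []), ("position1", []), ("position2", []), ("ties", [])] from by decide]
  rw [pvFoldA_items]
  simp only [List.nil_append, pvGroups_getD]
  rw [pvFilter_take preds_ab preds_ba (fun x y => (x == "A" && y == "B") || (x == "B" && y == "A")),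
      pvFilter_take preds_ab preds_ba (fun x y => x == "A" && y == "A"),
      pvFilter_take preds_ab preds_ba (fun x y => x == "B" && y == "B"),
      pvFilter_take preds_ab preds_ba (fun x y => x == "C" && y == "C")]
  rw [pvMerge_filter _ _ ?disj _ (pvLc_pairwise _)]
  case disj =>
    intro x hx
    obtain ⟨h1, h2⟩ := hx
    simp only [Bool.and_eq_true, beq_iff_eq] at h1 h2
    rw [h1.1] at h2
    exact absurd h2.1 (by decide)
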